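-- pv_equiv track=rewrite | github.com/aakalhor/p2p_petals_test | model_presets.py | partition_blocks
-- ===== SOURCE A (Python) =====
-- def partition_blocks(total_blocks: int, num_servers: int) -> list[tuple[int, int]]:
--     if num_servers <= 0:
--         raise ValueError("num_servers must be positive")
--
--     base_size = total_blocks // num_servers
--     remainder = total_blocks % num_servers
--     block_ranges = []
--     start = 0
--
--     for index in range(num_servers):
--         size = base_size + (1 if index < remainder else 0)
--         end = start + size
--         block_ranges.append((start, end))
--         start = end
--
--     return block_ranges
-- ===== SOURCE B (Python) =====
-- def partition_blocks(total_blocks: int, num_servers: int) -> list[tuple[int, int]]: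
--     if num_servers <= 0:
--         raise ValueError("num_servers must be positive")
--     base, rem = divmod(total_blocks, num_servers)
--     return [(i * base + min(i, rem), (i + 1) * base + min(i + 1, rem))
--             for i in range(num_servers)]
-- ===== Notes on version B (the rewrite author's own statement) =====
-- stated objective: alternative
-- what changed: Each (start, end) range is computed directly from its index by the closed form i*base + min(i, remainder), instead of threading a running start accumulator through the loop.
import Mathlib
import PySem

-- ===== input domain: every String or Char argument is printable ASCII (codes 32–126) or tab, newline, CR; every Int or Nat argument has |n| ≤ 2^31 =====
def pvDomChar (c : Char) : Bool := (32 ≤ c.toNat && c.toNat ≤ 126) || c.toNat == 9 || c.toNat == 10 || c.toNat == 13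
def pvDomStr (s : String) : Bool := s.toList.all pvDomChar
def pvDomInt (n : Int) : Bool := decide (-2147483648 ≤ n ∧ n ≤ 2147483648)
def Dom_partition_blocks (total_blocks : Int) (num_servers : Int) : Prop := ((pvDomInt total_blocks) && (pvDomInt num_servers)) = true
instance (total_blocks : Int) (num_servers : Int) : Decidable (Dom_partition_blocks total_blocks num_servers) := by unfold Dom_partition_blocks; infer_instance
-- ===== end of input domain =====

-- B computes each (start, end) range directly from its index via a closed form
-- (i*base + min(i, remainder)), replacing A's running-start accumulator; same O(n) cost.


-- ===== PORT A =====
-- Literal port of A: floor division and modulus, then a fold over range(num_servers)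
-- carrying (block_ranges, start).
def partition_blocks (total_blocks : Int) (num_servers : Int) : List (Int × Int) :=
  if num_servers ≤ 0 then []  -- Python raises ValueError here; excluded by Pre_
  else
    let base_size := PySem.Int.floordiv total_blocks num_servers
    let remainder := PySem.Int.mod total_blocks num_servers
    ((PySem.List.pyRange 0 num_servers 1).foldl
      (fun (st : List (Int × Int) × Int) index =>
        let size := base_size + (if index < remainder then 1 else 0)
        let e := st.2 + size
        (st.1 ++ [(st.2, e)], e))
      ([], 0)).1

-- ===== PORT B =====
-- Literal port of B: divmod, then map the closed-form tuple over range(num_servers).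
def partition_blocks_alt (total_blocks : Int) (num_servers : Int) : List (Int × Int) :=
  if num_servers ≤ 0 then []  -- Python raises ValueError here; excluded by Pre_
  else
    match PySem.Int.divmod? total_blocks num_servers with
    | none => []
    | some (base, rem) =>
      (PySem.List.pyRange 0 num_servers 1).map
        (fun i => (i * base + min i rem, (i + 1) * base + min (i + 1) rem))

-- ===== PRECONDITION & SPEC =====
-- A raises ValueError exactly when num_servers ≤ 0.
def Pre_partition_blocks (total_blocks : Int) (num_servers : Int) : Prop := 0 < num_servers
instance (total_blocks : Int) (num_servers : Int) : Decidable (Pre_partition_blocks total_blocks num_servers) := by unfold Pre_partition_blocks; infer_instance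
def pvWitness_partition_blocks : Int × Int := (10, 3)

def Spec_partition_blocks (total_blocks : Int) (num_servers : Int) (out : List (Int × Int)) : Prop := out = partition_blocks_alt total_blocks num_servers
instance (total_blocks : Int) (num_servers : Int) (out : List (Int × Int)) : Decidable (Spec_partition_blocks total_blocks num_servers out) := by unfold Spec_partition_blocks; infer_instance

-- ===== CLAIM (what is proved, stated in full; the proofs are below) =====
def Claim_equal_partition_blocks : Prop := ∀ (total_blocks : Int) (num_servers : Int), Dom_partition_blocks total_blocks num_servers → Pre_partition_blocks total_blocks num_servers → Spec_partition_blocks total_blocks num_servers (partition_blocks total_blocks num_servers)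

-- ===== LEMMAS AND PROOFS =====

-- Loop invariant: starting the fold at index a with start = a*base + min a rem
-- produces exactly the closed-form tuples for indices a..n-1, appended to the accumulator.
theorem pv_loop_eq (base rem : Int) :
    ∀ (k : Nat) (a n : Int) (acc : List (Int × Int)), (n - a).toNat = k →
      ((PySem.List.pyRange a n 1).foldl
        (fun (st : List (Int × Int) × Int) index =>
          let size := base + (if index < rem then 1 else 0)
          let e := st.2 + size
          (st.1 ++ [(st.2, e)], e))
        (acc, a * base + min a rem)).1
      = acc ++ (PySem.List.pyRange a n 1).map
          (fun i => (i * base + min i rem, (i + 1) * base + min (i + 1) rem)) := by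
  intro k
  induction k with
  | zero =>
    intro a n acc hk
    rw [PySem.List.pyRange_one_eq_nil (by omega)]
    simp
  | succ m ih =>
    intro a n acc hk
    have hab : a < n := by omega
    rw [PySem.List.pyRange_one_cons hab]
    simp only [List.foldl_cons, List.map_cons]
    have hstep : a * base + min a rem + (base + (if a < rem then 1 else 0))
        = (a + 1) * base + min (a + 1) rem := by
      split_ifs with h <;> [skip; skip] <;> · rw [add_one_mul]; omega
    rw [hstep]
    rw [ih (a + 1) n (acc ++ [(a * base + min a rem, (a + 1) * base + min (a + 1) rem)]) (by omega)]
    simp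

-- ===== VERDICT (by name: the statement is the Claim_ definition above) =====
theorem partition_blocks_spec : Claim_equal_partition_blocks := by
  intro t n _ hn
  have hn0 : 0 < n := hn
  unfold Spec_partition_blocks partition_blocks partition_blocks_alt
  have hn' : ¬ n ≤ 0 := by omega
  
  simp only [if_neg hn']
  have hne : n ≠ 0 := by omega
  rw [show PySem.Int.divmod? t n = some (PySem.Int.floordiv t n, PySem.Int.mod t n) by
    simp [PySem.Int.divmod?, PySem.Int.floordiv, PySem.Int.mod, hne]]
  have h := pv_loop_eq (PySem.Int.floordiv t n) (PySem.Int.mod t n) (n - 0).toNat 0 n [] rfl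
  simp only [zero_mul, zero_add] at h
  rw [show (min 0 (PySem.Int.mod t n)) = 0 by
    have := PySem.Int.mod_nonneg t (b := n) (by omega); omega] at h
  simpa using h
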